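-- pv_equiv track=rewrite | github.com/cctbx/cctbx_project | libtbx/command_line/add_docstrings_with_ai.py | get_doc_string_block_lines
-- ===== SOURCE A (Python) =====
-- def get_doc_string_block_lines(i,original_lines, orig_doc_string_line_ranges):
--   first_line = None
--   last_line = None
--   for i1, i2 in orig_doc_string_line_ranges:
--     if (first_line is None):
--       if i == i1: # found range where i appears
--         first_line = i1
--         last_line = i2
--       else:  # not yet there
--         continue
--     elif i1 > last_line + 1: # done
--       return original_lines[first_line:last_line+1]
--     else:  # keep going, contiguous lines
--       last_line = i2
--   if first_line is not None:
--     return original_lines[first_line:last_line+1]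
--   else:
--     return []
-- ===== SOURCE B (Python) =====
-- def get_doc_string_block_lines(i, original_lines, orig_doc_string_line_ranges):
--     # Build, back to front, an index: each range's start -> the end of its merged
--     # contiguous block (a later duplicate start is overwritten by the earlier one).
--     end_for_start = {}
--     following = None  # (start, merged_end) of the range just after the current one
--     for i1, i2 in reversed(orig_doc_string_line_ranges):
--         merged = following[1] if (following is not None and following[0] <= i2 + 1) else i2
--         end_for_start[i1] = merged
--         following = (i1, merged)
--     if i in end_for_start:
--         return original_lines[i:end_for_start[i] + 1]
--     return []
-- ===== Notes on version B (the rewrite author's own statement) =====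
-- stated objective: alternative
-- what changed: Instead of A's forward flag-driven scan that searches for i and then merges, B traverses the ranges once in REVERSE building a dictionary from every range start to its merged contiguous-block end, and answers the query by a single dictionary lookup and slice.
import Mathlib
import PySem

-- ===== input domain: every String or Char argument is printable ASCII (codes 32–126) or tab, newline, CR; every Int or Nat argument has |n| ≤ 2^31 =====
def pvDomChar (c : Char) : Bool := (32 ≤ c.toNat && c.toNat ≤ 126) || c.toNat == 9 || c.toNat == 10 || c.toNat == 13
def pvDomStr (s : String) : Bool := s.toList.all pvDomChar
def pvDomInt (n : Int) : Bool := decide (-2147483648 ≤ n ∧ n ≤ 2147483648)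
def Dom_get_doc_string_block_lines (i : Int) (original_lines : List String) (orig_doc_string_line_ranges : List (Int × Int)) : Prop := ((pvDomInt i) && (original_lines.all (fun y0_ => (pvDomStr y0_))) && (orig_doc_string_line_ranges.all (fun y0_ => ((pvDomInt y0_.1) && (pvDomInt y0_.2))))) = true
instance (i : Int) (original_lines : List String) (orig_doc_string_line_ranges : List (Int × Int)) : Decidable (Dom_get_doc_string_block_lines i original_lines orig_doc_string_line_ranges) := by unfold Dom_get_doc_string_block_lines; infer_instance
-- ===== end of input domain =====

-- B replaces A's forward flag-driven scan by one reverse pass building a start→merged-end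
-- dictionary for all blocks, answered by a single lookup (objective: alternative).

-- ===== PORT A =====
-- A's loop: state (first_line,last_line), both None or both set, modelled as Option (Int × Int).
def pvALoop (i : Int) (original_lines : List String) :
    List (Int × Int) → Option (Int × Int) → List String
  | [], none => []
  | [], some (f, l) => PySem.List.slice original_lines (some f) (some (l + 1))
  | (i1, i2) :: rest, none =>
      if i = i1 then pvALoop i original_lines rest (some (i1, i2))
      else pvALoop i original_lines rest none
  | (i1, i2) :: rest, some (f, l) =>
      if i1 > l + 1 then PySem.List.slice original_lines (some f) (some (l + 1))
      else pvALoop i original_lines rest (some (f, i2))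

def get_doc_string_block_lines (i : Int) (original_lines : List String) (orig_doc_string_line_ranges : List (Int × Int)) : List String :=
  pvALoop i original_lines orig_doc_string_line_ranges none

-- ===== PORT B =====
-- One step of Source B's reverse loop; state = (end_for_start dict, `following` option).
def pvBStep (st : PySem.Dict Int Int × Option (Int × Int)) (r : Int × Int) :
    PySem.Dict Int Int × Option (Int × Int) :=
  let merged :=
    match st.2 with
    | some (s, m) => if s ≤ r.2 + 1 then m else r.2
    | none => r.2
  (st.1.insert r.1 merged, some (r.1, merged))

def get_doc_string_block_lines_alt (i : Int) (original_lines : List String) (orig_doc_string_line_ranges : List (Int × Int)) : List String :=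
  let st := orig_doc_string_line_ranges.reverse.foldl pvBStep (PySem.Dict.empty, none)
  match st.1.get? i with
  | some e => PySem.List.slice original_lines (some i) (some (e + 1))
  | none => []

-- ===== PRECONDITION & SPEC =====
def Spec_get_doc_string_block_lines (i : Int) (original_lines : List String) (orig_doc_string_line_ranges : List (Int × Int)) (out : List String) : Prop := out = get_doc_string_block_lines_alt i original_lines orig_doc_string_line_ranges
instance (i : Int) (original_lines : List String) (orig_doc_string_line_ranges : List (Int × Int)) (out : List String) : Decidable (Spec_get_doc_string_block_lines i original_lines orig_doc_string_line_ranges out) := by unfold Spec_get_doc_string_block_lines; infer_instance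

-- ===== CLAIM (what is proved, stated in full; the proofs are below) =====
def Claim_equal_get_doc_string_block_lines : Prop := ∀ (i : Int) (original_lines : List String) (orig_doc_string_line_ranges : List (Int × Int)), Dom_get_doc_string_block_lines i original_lines orig_doc_string_line_ranges → Spec_get_doc_string_block_lines i original_lines orig_doc_string_line_ranges (get_doc_string_block_lines i original_lines orig_doc_string_line_ranges)

-- ===== LEMMAS AND PROOFS =====
-- Structural-recursion reformulation of B's reverse fold (head processed last).
def pvBRec : List (Int × Int) → PySem.Dict Int Int × Option (Int × Int)
  | [] => (PySem.Dict.empty, none)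
  | r :: rest => pvBStep (pvBRec rest) r

theorem pvBRec_eq_fold (l : List (Int × Int)) :
    l.reverse.foldl pvBStep (PySem.Dict.empty, none) = pvBRec l := by
  induction l with
  | nil => rfl
  | cons r rest ih => simp [pvBRec, List.foldl_append, ih]

-- The end A's merge phase computes, starting from last = `last` over the remaining ranges.
def pvChain (last : Int) : List (Int × Int) → Int
  | [] => last
  | (i1, i2) :: rest => if i1 > last + 1 then last else pvChain i2 rest

-- A's merge phase, once a range is found, yields a slice with end pvChain.
theorem pvALoop_some (i : Int) (lines : List String) :
    ∀ (rest : List (Int × Int)) (f l : Int),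
      pvALoop i lines rest (some (f, l)) =
        PySem.List.slice lines (some f) (some (pvChain l rest + 1)) := by
  intro rest
  induction rest with
  | nil => intro f l; simp [pvALoop, pvChain]
  | cons r rest ih =>
      intro f l
      obtain ⟨i1, i2⟩ := r
      by_cases h : i1 > l + 1
      · simp [pvALoop, pvChain, h]
      · simp [pvALoop, pvChain, h, ih]

-- B's `following` component is the head's start with its merged end = pvChain of its tail.
theorem pvBRec_snd : ∀ (l : List (Int × Int)),
    (pvBRec l).2 = match l with
      | [] => none
      | (i1, i2) :: rest => some (i1, pvChain i2 rest) := by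
  intro l
  induction l with
  | nil => rfl
  | cons r rest ih =>
      obtain ⟨i1, i2⟩ := r
      cases rest with
      | nil => rfl
      | cons r' rest' =>
          obtain ⟨j1, j2⟩ := r'
          rw [show pvBRec ((i1, i2) :: (j1, j2) :: rest') =
                pvBStep (pvBRec ((j1, j2) :: rest')) (i1, i2) from rfl]
          simp only [pvBStep, ih]
          by_cases h : j1 > i2 + 1
          · simp [pvChain, h, not_le.mpr h]
          · simp [pvChain, h, not_lt.mp h]

-- Main correspondence: A's scan from the `none` state equals B's dictionary lookup.
theorem pvALoop_none (i : Int) (lines : List String) :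
    ∀ (ranges : List (Int × Int)),
      pvALoop i lines ranges none =
        match (pvBRec ranges).1.get? i with
        | some e => PySem.List.slice lines (some i) (some (e + 1))
        | none => [] := by
  intro ranges
  induction ranges with
  | nil => simp [pvALoop, pvBRec, PySem.Dict.get?_empty]
  | cons r rest ih =>
      obtain ⟨i1, i2⟩ := r
      have hsnd := pvBRec_snd rest
      by_cases h : i = i1
      · subst h
        simp only [pvBRec, pvBStep, PySem.Dict.get?_insert_self, pvALoop]
        rw [pvALoop_some]
        cases rest with
        | nil => simp [pvBRec, pvChain]
        | cons r' rest' =>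
            obtain ⟨j1, j2⟩ := r'
            simp only [hsnd]
            by_cases hj : j1 > i2 + 1
            · simp [pvChain, hj, not_le.mpr hj]
            · simp [pvChain, hj, not_lt.mp hj]
      · have h' : ¬ i1 = i := fun hh => h hh.symm
        simp only [pvBRec, pvBStep]
        rw [PySem.Dict.get?_insert_of_ne _ _ (fun hh => h hh)]
        simpa [pvALoop, h] using ih

-- ===== VERDICT (by name: the statement is the Claim_ definition above) =====
theorem get_doc_string_block_lines_spec : Claim_equal_get_doc_string_block_lines := by
  intro i lines ranges _
  unfold Spec_get_doc_string_block_lines get_doc_string_block_lines get_doc_string_block_lines_alt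
  rw [pvBRec_eq_fold]
  exact pvALoop_none i lines ranges
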